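-- pv_equiv track=rewrite | github.com/tim-mathews/hamming-distance-heuristic-search | Sequential search/sequential.py | heuristic_search
-- ===== SOURCE A (Python) =====
-- def heuristic_search(total_bits, distance):
--     # Searches for a hamming distance using a heuristic search
--     correct_strings = []
--     strings = [string for string in range(pow(2, total_bits))]
--     while len(strings) > 0:
--         current_num = strings.pop(0)
--         correct_strings.append(bin(current_num)[2:])
--         strings = [i for i in strings if list(bin(current_num ^ i)).count('1') >= distance]
--
--     # formatting for the list
--     final_list = []
--     for i in correct_strings:
--         while len(i) < total_bits:
--             i = '0' + i
--         final_list.append(i)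
--     return final_list
-- ===== SOURCE B (Python) =====
-- def heuristic_search(total_bits, distance):
--     # Single ascending pass: keep x iff it is far enough from every already-kept number.
--     selected = []
--     for x in range(2 ** total_bits):
--         if all(bin(x ^ s).count('1') >= distance for s in selected):
--             selected.append(x)
--     return [bin(x)[2:].zfill(total_bits) for x in selected]
-- ===== Notes on version B (the rewrite author's own statement) =====
-- stated objective: simpler
-- what changed: Replaces the pop-and-refilter loop over a shrinking candidate list (plus a while-loop padding pass) with one ascending scan that tests each number against the growing accepted set and formats with zfill.
import Mathlib
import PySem

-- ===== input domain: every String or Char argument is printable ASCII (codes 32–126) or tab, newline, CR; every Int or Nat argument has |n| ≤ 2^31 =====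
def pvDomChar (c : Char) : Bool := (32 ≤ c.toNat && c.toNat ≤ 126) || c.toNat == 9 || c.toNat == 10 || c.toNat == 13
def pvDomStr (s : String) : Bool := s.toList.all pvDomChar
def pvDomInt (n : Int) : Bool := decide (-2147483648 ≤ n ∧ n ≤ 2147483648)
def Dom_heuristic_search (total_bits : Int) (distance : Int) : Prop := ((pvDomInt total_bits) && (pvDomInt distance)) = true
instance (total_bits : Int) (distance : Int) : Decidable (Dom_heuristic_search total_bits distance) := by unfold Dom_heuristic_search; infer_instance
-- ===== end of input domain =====

-- B replaces A's pop-and-refilter greedy loop (which rebuilds the candidate list each round,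
-- plus a while-loop zero-padding pass) with a single ascending scan that keeps a number iff it is
-- far enough from every already-kept number, padding by string multiplication; objective: simpler.

-- list(bin(a ^ b)).count('1')  (shared arithmetic helper: both Pythons use this very expression)
def pvHam (a b : Nat) : Int :=
  (((PySem.Int.toBinChars0b (PySem.Int.bxor (a : Int) (b : Int))).count '1' : Nat) : Int)

-- ===== PORT A =====
-- the while-loop: pop the head, record its bin string, refilter the remaining candidates
def pvLoopA (d : Int) : List Nat → List (List Char) → List (List Char)
  | [], correct => correct
  | cur :: rest, correct =>
      pvLoopA d (rest.filter (fun i => decide (d ≤ pvHam cur i)))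
        (correct ++ [PySem.Int.toBinChars (cur : Int)])
  termination_by l => l.length
  decreasing_by
    simpa using Nat.lt_succ_of_le ((List.length_filter_le _ _).trans (by simp))

-- while len(i) < total_bits: i = '0' + i
def pvPadA (tb : Int) (s : List Char) : List Char :=
  if (s.length : Int) < tb then pvPadA tb ('0' :: s) else s
  termination_by (tb - s.length).toNat
  decreasing_by simp only [List.length_cons] at *; omega

def heuristic_search (total_bits : Int) (distance : Int) : List String :=
  (pvLoopA distance (List.range (2 ^ total_bits.toNat)) []).map
    (fun i => String.ofList (pvPadA total_bits i))

-- ===== PORT B =====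
-- all(bin(x ^ s).count('1') >= distance for s in selected)
def pvCheckB (d : Int) (x : Nat) (sel : List Nat) : Bool :=
  sel.all (fun s => decide (d ≤ pvHam x s))

-- the single ascending pass maintaining the accepted set
def pvFoldB (d : Int) (l : List Nat) (sel : List Nat) : List Nat :=
  l.foldl (fun sel x => if pvCheckB d x sel then sel ++ [x] else sel) sel

def heuristic_search_alt (total_bits : Int) (distance : Int) : List String :=
  (pvFoldB distance (List.range (2 ^ total_bits.toNat)) []).map
    (fun x =>
      let s := PySem.Int.toBinChars (x : Int)
      String.ofList (List.replicate (total_bits - s.length).toNat '0' ++ s))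

-- ===== PRECONDITION & SPEC =====
-- A raises TypeError for total_bits < 0 (pow(2, total_bits) is a float there), so those inputs are excluded.
def Pre_heuristic_search (total_bits : Int) (distance : Int) : Prop := 0 ≤ total_bits
instance (total_bits : Int) (distance : Int) : Decidable (Pre_heuristic_search total_bits distance) := by
  unfold Pre_heuristic_search; infer_instance

def pvWitness_heuristic_search : Int × Int := (3, 2)

def Spec_heuristic_search (total_bits : Int) (distance : Int) (out : List String) : Prop := out = heuristic_search_alt total_bits distance
instance (total_bits : Int) (distance : Int) (out : List String) : Decidable (Spec_heuristic_search total_bits distance out) := by unfold Spec_heuristic_search; infer_instance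

-- ===== CLAIM (what is proved, stated in full; the proofs are below) =====
def Claim_equal_heuristic_search : Prop := ∀ (total_bits : Int) (distance : Int), Dom_heuristic_search total_bits distance → Pre_heuristic_search total_bits distance → Spec_heuristic_search total_bits distance (heuristic_search total_bits distance)

-- ===== LEMMAS AND PROOFS =====

theorem pvHam_comm (a b : Nat) : pvHam a b = pvHam b a := by
  unfold pvHam
  rw [PySem.Int.bxor_comm]

-- A's loop on the bare numbers (the bin strings are taken afterwards)
def pvSelA (d : Int) : List Nat → List Nat → List Nat
  | [], sel => sel
  | cur :: rest, sel =>
      pvSelA d (rest.filter (fun i => decide (d ≤ pvHam cur i))) (sel ++ [cur])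
  termination_by l => l.length
  decreasing_by
    simpa using Nat.lt_succ_of_le ((List.length_filter_le _ _).trans (by simp))

theorem pvFoldB_cons (d : Int) (x : Nat) (l sel : List Nat) :
    pvFoldB d (x :: l) sel = pvFoldB d l (if pvCheckB d x sel then sel ++ [x] else sel) := rfl

theorem pvSelA_append (d : Int) : ∀ (n : Nat) (l : List Nat), l.length ≤ n →
    ∀ (sel : List Nat), pvSelA d l sel = sel ++ pvSelA d l [] := by
  intro n
  induction n with
  | zero =>
      intro l hl sel
      have : l = [] := List.length_eq_zero_iff.mp (Nat.le_zero.mp hl)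
      subst this; rw [pvSelA, pvSelA]; simp
  | succ n ih =>
      intro l hl sel
      match l with
      | [] => rw [pvSelA, pvSelA]; simp
      | cur :: rest =>
          have hlen : (rest.filter (fun i => decide (d ≤ pvHam cur i))).length ≤ n := by
            have := List.length_filter_le (fun i => decide (d ≤ pvHam cur i)) rest
            simp only [List.length_cons] at hl
            omega
          rw [pvSelA, pvSelA, ih _ hlen (sel ++ [cur]), ih _ hlen ([] ++ [cur])]
          simp

theorem pvLoopA_eq_selA (d : Int) : ∀ (n : Nat) (l : List Nat), l.length ≤ n →
    ∀ (correct : List (List Char)),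
    pvLoopA d l correct =
      correct ++ (pvSelA d l []).map (fun x => PySem.Int.toBinChars (x : Int)) := by
  intro n
  induction n with
  | zero =>
      intro l hl correct
      have : l = [] := List.length_eq_zero_iff.mp (Nat.le_zero.mp hl)
      subst this; rw [pvLoopA, pvSelA]; simp
  | succ n ih =>
      intro l hl correct
      match l with
      | [] => rw [pvLoopA, pvSelA]; simp
      | cur :: rest =>
          have hlen : (rest.filter (fun i => decide (d ≤ pvHam cur i))).length ≤ n := by
            have := List.length_filter_le (fun i => decide (d ≤ pvHam cur i)) rest
            simp only [List.length_cons] at hl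
            omega
          rw [pvLoopA, pvSelA, ih _ hlen, pvSelA_append d _ _ hlen ([] ++ [cur])]
          simp

theorem pvCheckB_mem_mono (d : Int) (x c : Nat) (sel : List Nat) (hc : c ∈ sel) :
    c ∈ (if pvCheckB d x sel then sel ++ [x] else sel) := by
  split <;> simp [hc]

-- folding B over a list skips exactly the elements too close to any already-selected number
theorem pvFoldB_filter (d : Int) (c : Nat) : ∀ (l sel : List Nat), c ∈ sel →
    pvFoldB d l sel = pvFoldB d (l.filter (fun i => decide (d ≤ pvHam c i))) sel := by
  intro l
  induction l with
  | nil => simp [pvFoldB]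
  | cons x rest ih =>
      intro sel hc
      by_cases hx : d ≤ pvHam c x
      · have hfc : (x :: rest).filter (fun i => decide (d ≤ pvHam c i)) =
            x :: rest.filter (fun i => decide (d ≤ pvHam c i)) := by
          simp [hx]
        rw [hfc, pvFoldB_cons, pvFoldB_cons]
        exact ih _ (pvCheckB_mem_mono d x c sel hc)
      · have hfalse : pvCheckB d x sel = false := by
          unfold pvCheckB
          simp only [List.all_eq_false]
          exact ⟨c, hc, by simpa [pvHam_comm x c] using hx⟩
        have hfc : (x :: rest).filter (fun i => decide (d ≤ pvHam c i)) =
            rest.filter (fun i => decide (d ≤ pvHam c i)) := by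
          simp [hx]
        rw [hfc, pvFoldB_cons, hfalse]
        simp only [Bool.false_eq_true, if_false]
        exact ih sel hc

-- main invariant: when every pending candidate is already far from every selected number,
-- A's filter-based greedy loop and B's check-based fold agree
theorem pvSelA_eq_foldB (d : Int) : ∀ (n : Nat) (l : List Nat), l.length ≤ n →
    ∀ (sel : List Nat), (∀ x ∈ l, ∀ c ∈ sel, d ≤ pvHam c x) →
    pvSelA d l sel = pvFoldB d l sel := by
  intro n
  induction n with
  | zero =>
      intro l hl sel _
      have : l = [] := List.length_eq_zero_iff.mp (Nat.le_zero.mp hl)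
      subst this; rw [pvSelA]; rfl
  | succ n ih =>
      intro l hl sel hinv
      match l with
      | [] => rw [pvSelA]; rfl
      | cur :: rest =>
          have hcheck : pvCheckB d cur sel = true := by
            unfold pvCheckB
            simp only [List.all_eq_true, decide_eq_true_eq]
            intro c hc
            rw [pvHam_comm]
            exact hinv cur (by simp) c hc
          rw [pvSelA, pvFoldB_cons, if_pos hcheck]
          have hstep : pvFoldB d rest (sel ++ [cur]) =
              pvFoldB d (rest.filter (fun i => decide (d ≤ pvHam cur i))) (sel ++ [cur]) :=
            pvFoldB_filter d cur rest (sel ++ [cur]) (by simp)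
          have hlen : (rest.filter (fun i => decide (d ≤ pvHam cur i))).length ≤ n := by
            have := List.length_filter_le (fun i => decide (d ≤ pvHam cur i)) rest
            simp only [List.length_cons] at hl
            omega
          have hinv' : ∀ x ∈ rest.filter (fun i => decide (d ≤ pvHam cur i)),
              ∀ c ∈ sel ++ [cur], d ≤ pvHam c x := by
            intro x hx c hc
            have hxr := List.mem_of_mem_filter hx
            have hxf := List.of_mem_filter hx
            rcases List.mem_append.mp hc with hc | hc
            · exact hinv x (by simp [hxr]) c hc
            · have : c = cur := by simpa using hc
              subst this
              simpa using hxf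
          rw [ih _ hlen (sel ++ [cur]) hinv']
          exact hstep.symm

-- A's while-padding equals left-padding with the right number of zeros
theorem pvPadA_eq_replicate (tb : Int) : ∀ (s : List Char),
    pvPadA tb s = List.replicate (tb - s.length).toNat '0' ++ s := by
  intro s
  induction s using pvPadA.induct tb with
  | case1 s hlt ih =>
      rw [pvPadA, if_pos hlt, ih]
      have hk : (tb - (('0' :: s).length : Int)).toNat + 1 = (tb - s.length).toNat := by
        simp only [List.length_cons]; omega
      rw [← hk, List.replicate_succ', List.append_assoc]
      rfl
  | case2 s hge =>
      rw [pvPadA, if_neg hge]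
      have : (tb - (s.length : Int)).toNat = 0 := by omega
      simp [this]

-- ===== VERDICT (by name: the statement is the Claim_ definition above) =====
theorem heuristic_search_spec : Claim_equal_heuristic_search := by
  intro total_bits distance _ _
  unfold Spec_heuristic_search heuristic_search heuristic_search_alt
  rw [pvLoopA_eq_selA distance (List.range (2 ^ total_bits.toNat)).length _ le_rfl,
      pvSelA_eq_foldB distance (List.range (2 ^ total_bits.toNat)).length _ le_rfl []
        (by intro x _ c hc; simp at hc)]
  simp only [List.nil_append, List.map_map]
  apply List.map_congr_left
  intro x _
  simp [Function.comp, pvPadA_eq_replicate]
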